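-- pv_equiv track=rewrite | github.com/yamunasoftware/WhatFeed | src/processing.py | delimit
-- ===== SOURCE A (Python) =====
-- characters = [
--   'A', 'B', 'C', 'D', 'E', 'F', 'G', 'H', 'I', 'J', 'K', 'L', 'M', 'N', 'O', 'P', 'Q', 'R', 'S', 'T', 'U', 'V', 'W', 'X', 'Y', 'Z',
--   'a', 'b', 'c', 'd', 'e', 'f', 'g', 'h', 'i', 'j', 'k', 'l', 'm', 'n', 'o', 'p', 'q', 'r', 's', 't', 'u', 'v', 'w', 'x', 'y', 'z',
--   '0', '1', '2', '3', '4', '5', '6', '7', '8', '9',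
--   '$', '€', '£', '¥', '₹', '₽', '¢', '₩', '₪', '₫',
--   '.', ',', '!', '?', ':', ';', "'", '"', '(', ')', '[', ']', '{', '}', '-', '_', '+', '=', '*', '/', '\\', '|', '<', '>', '@', '#', '%', '^', '&', '`', '~'
-- ]
--
-- def delimit(data):
--   delimited_data = []
--   for entry in data:
--     tokens = entry.split(' ')
--     no_empty = remove_empty_tokens(tokens)
--     chars = remove_non_text(no_empty)
--     delimited_data.append(chars)
--   return delimited_data
--
-- def remove_empty_tokens(tokens):
--   new_tokens = []
--   for token in tokens:
--     if token != '':
--       new_tokens.append(token)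
--   return new_tokens
--
-- def remove_non_text(tokens):
--   new_tokens = []
--   for token in tokens:
--     new_token = ''
--     for character in token:
--       if character in characters:
--         new_token = new_token + character
--     new_tokens.append(new_token)
--   return new_tokens
-- ===== SOURCE B (Python) =====
-- characters = [
--   'A', 'B', 'C', 'D', 'E', 'F', 'G', 'H', 'I', 'J', 'K', 'L', 'M', 'N', 'O', 'P', 'Q', 'R', 'S', 'T', 'U', 'V', 'W', 'X', 'Y', 'Z',
--   'a', 'b', 'c', 'd', 'e', 'f', 'g', 'h', 'i', 'j', 'k', 'l', 'm', 'n', 'o', 'p', 'q', 'r', 's', 't', 'u', 'v', 'w', 'x', 'y', 'z',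
--   '0', '1', '2', '3', '4', '5', '6', '7', '8', '9',
--   '$', '€', '£', '¥', '₹', '₽', '¢', '₩', '₪', '₫',
--   '.', ',', '!', '?', ':', ';', "'", '"', '(', ')', '[', ']', '{', '}', '-', '_', '+', '=', '*', '/', '\\', '|', '<', '>', '@', '#', '%', '^', '&', '`', '~'
-- ]
--
-- ALLOWED = frozenset(characters)
--
-- def _scan(entry):
--   # one pass over the characters: a maximal run of non-space chars is a token
--   # (it is emitted even if stripping leaves it empty); allowed chars are kept.
--   out = []
--   cur = []        # allowed chars of the current run
--   in_token = False  # are we inside a (pre-strip non-empty) run?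
--   for c in entry:
--     if c == ' ':
--       if in_token:
--         out.append(''.join(cur))
--       cur = []
--       in_token = False
--     else:
--       in_token = True
--       if c in ALLOWED:
--         cur.append(c)
--   if in_token:
--     out.append(''.join(cur))
--   return out
--
-- def delimit(data):
--   return [_scan(entry) for entry in data]
-- ===== Notes on version B (the rewrite author's own statement) =====
-- stated objective: alternative
-- what changed: A's three staged passes per entry (split on ' ', a loop dropping empty tokens, a loop stripping disallowed chars) are replaced by a single character-level state machine that scans each entry once, tracking the current run's kept characters and an in-token flag, emitting a token at each run end.
import Mathlib
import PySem

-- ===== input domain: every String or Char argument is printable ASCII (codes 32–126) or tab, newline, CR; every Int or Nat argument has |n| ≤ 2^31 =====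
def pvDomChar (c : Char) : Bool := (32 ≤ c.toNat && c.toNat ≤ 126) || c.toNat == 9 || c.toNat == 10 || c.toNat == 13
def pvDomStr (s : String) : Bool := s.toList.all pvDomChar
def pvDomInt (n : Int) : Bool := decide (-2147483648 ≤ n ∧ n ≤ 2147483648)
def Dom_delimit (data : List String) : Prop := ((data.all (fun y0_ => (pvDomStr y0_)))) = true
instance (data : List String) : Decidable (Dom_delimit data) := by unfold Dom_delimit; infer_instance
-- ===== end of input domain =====

-- B replaces A's split / drop-empty / strip pipeline (three staged passes per entry) by a
-- single character-level state machine per entry; objective: alternative algorithm, same behaviour.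

-- the module-level `characters` list (shared constant of the module, used by both versions)
def pyCharacters : List Char :=
  ['A','B','C','D','E','F','G','H','I','J','K','L','M','N','O','P','Q','R','S','T','U','V','W','X','Y','Z',
   'a','b','c','d','e','f','g','h','i','j','k','l','m','n','o','p','q','r','s','t','u','v','w','x','y','z',
   '0','1','2','3','4','5','6','7','8','9',
   '$','€','£','¥','₹','₽','¢','₩','₪','₫',
   '.',',','!','?',':',';','\'','"','(',')','[',']','{','}','-','_','+','=','*','/','\\','|','<','>','@','#','%','^','&','`','~']

-- entry.split(' ')  (sep is the non-empty string " ", so Python never raises here)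
def pySplitSpace (s : String) : List String :=
  (PySem.Chars.splitOn s.toList [' ']).map String.mk

-- ===== PORT A =====
def remove_empty_tokens (tokens : List String) : List String :=
  tokens.foldl (fun new_tokens token =>
    if token ≠ "" then new_tokens ++ [token] else new_tokens) []

def remove_non_text (tokens : List String) : List String :=
  tokens.foldl (fun new_tokens token =>
    let new_token := token.toList.foldl (fun new_token character =>
      if character ∈ pyCharacters then new_token ++ [character] else new_token) []
    new_tokens ++ [String.mk new_token]) []

def delimit (data : List String) : List (List String) :=
  data.foldl (fun delimited_data entry =>
    let tokens := pySplitSpace entry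
    let no_empty := remove_empty_tokens tokens
    let chars := remove_non_text no_empty
    delimited_data ++ [chars]) []

-- ===== PORT B =====
-- ALLOWED = frozenset(characters)
def pyAllowed : PySem.Set Char := PySem.Set.ofList pyCharacters

-- one step of the scanner: state = (emitted tokens, allowed chars of the current run,
-- "inside a run" flag)
def scanStep (st : List (List Char) × List Char × Bool) (c : Char) :
    List (List Char) × List Char × Bool :=
  if c = ' ' then
    ((if st.2.2 then st.1 ++ [st.2.1] else st.1), [], false)
  else
    (st.1, (if PySem.Set.contains pyAllowed c then st.2.1 ++ [c] else st.2.1), true)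

-- _scan(entry): one pass over the characters, then flush the pending run
def scanEntry (cs : List Char) : List String :=
  let st := cs.foldl scanStep ([], [], false)
  (if st.2.2 then st.1 ++ [st.2.1] else st.1).map String.mk

def delimit_alt (data : List String) : List (List String) :=
  data.map (fun entry => scanEntry entry.toList)

-- ===== PRECONDITION & SPEC =====
def Spec_delimit (data : List String) (out : List (List String)) : Prop := out = delimit_alt data
instance (data : List String) (out : List (List String)) : Decidable (Spec_delimit data out) := by unfold Spec_delimit; infer_instance

-- ===== CLAIM =====
def Claim_equal_delimit : Prop := ∀ (data : List String), Dom_delimit data → Spec_delimit data (delimit data)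

-- ===== LEMMAS AND PROOFS =====

-- A's per-token stripping, as a filter over the char list
def stripA (t : List Char) : List Char := t.filter (fun c => c ∈ pyCharacters)

-- recursive specification of B's scanner on the remaining characters
def process (s : List Char) (b : Bool) : List Char → List (List Char)
  | [] => if b then [s] else []
  | c :: rest =>
      if c = ' ' then (if b then [s] else []) ++ process [] false rest
      else process (if PySem.Set.contains pyAllowed c then s ++ [c] else s) true rest

def flushSt (st : List (List Char) × List Char × Bool) : List (List Char) :=
  if st.2.2 then st.1 ++ [st.2.1] else st.1

-- B side: the fold is `process`
theorem scan_process (l : List Char) :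
    ∀ (toks : List (List Char)) (cur : List Char) (seen : Bool),
      flushSt (l.foldl scanStep (toks, cur, seen)) = toks ++ process cur seen l := by
  induction l with
  | nil =>
      intro toks cur seen
      cases seen <;> simp [flushSt, process]
  | cons c rest ih =>
      intro toks cur seen
      by_cases h : c = ' '
      · subst h
        simp only [List.foldl_cons, scanStep, process]
        rw [ih]
        cases seen <;> simp
      · simp only [List.foldl_cons, scanStep, if_neg h, process]
        rw [ih]

-- A side: splitOn's worker, filtered of empties and stripped, is `process`
theorem go_process (l : List Char) :
    ∀ (fuel : Nat) (cur : List Char) (acc : List (List Char)), l.length ≤ fuel →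
      ((PySem.Chars.splitOn.go [' '] fuel l cur acc).filter (fun t => t ≠ [])).map stripA
        = ((acc.reverse.filter (fun t => t ≠ [])).map stripA)
            ++ process (stripA cur.reverse) (!cur.isEmpty) l := by
  induction l with
  | nil =>
      intro fuel cur acc _
      cases fuel <;>
        cases cur <;>
          simp [PySem.Chars.splitOn.go, process, stripA]
  | cons c rest ih =>
      intro fuel cur acc hf
      cases fuel with
      | zero => simp at hf
      | succ f =>
          have hf' : rest.length ≤ f := by simpa using hf
          by_cases h : c = ' '
          · subst h
            rw [show PySem.Chars.splitOn.go [' '] (f + 1) (' ' :: rest) cur acc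
                  = PySem.Chars.splitOn.go [' '] f rest [] (cur.reverse :: acc) by
                simp [PySem.Chars.splitOn.go, List.isPrefixOf]]
            rw [ih f [] (cur.reverse :: acc) hf']
            cases cur <;> simp [stripA, process, List.filter_append]
          · rw [show PySem.Chars.splitOn.go [' '] (f + 1) (c :: rest) cur acc
                  = PySem.Chars.splitOn.go [' '] f rest (c :: cur) acc by
                simp [PySem.Chars.splitOn.go, List.isPrefixOf, Ne.symm h]]
            rw [ih f (c :: cur) acc hf']
            have hstrip : stripA ((c :: cur).reverse) =
                if PySem.Set.contains pyAllowed c then stripA cur.reverse ++ [c]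
                else stripA cur.reverse := by
              by_cases hc : c ∈ pyCharacters <;>
                simp [stripA, List.filter_append, pyAllowed, PySem.Set.mem_ofList, hc]
            simp only [process]
            rw [if_neg h, hstrip]
            simp

theorem split_process (cs : List Char) :
    ((PySem.Chars.splitOn cs [' ']).filter (fun t => t ≠ [])).map stripA
      = process [] false cs := by
  have := go_process cs (cs.length + 1) [] [] (by omega)
  simpa [PySem.Chars.splitOn] using this

theorem remove_empty_tokens_eq (tokens : List String) :
    remove_empty_tokens tokens = tokens.filter (fun t => t ≠ "") := by
  unfold remove_empty_tokens
  simpa using PySem.List.foldl_append_if_eq_filter (fun t : String => t ≠ "") tokens []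

theorem inner_fold_eq (cs : List Char) (acc : List Char) :
    cs.foldl (fun nt c => if c ∈ pyCharacters then nt ++ [c] else nt) acc
      = acc ++ cs.filter (fun c => c ∈ pyCharacters) := by
  simpa using PySem.List.foldl_append_if_eq_filter (fun c : Char => c ∈ pyCharacters) cs acc

theorem remove_non_text_eq (tokens : List String) :
    remove_non_text tokens = tokens.map (fun tok => String.mk (stripA tok.toList)) := by
  unfold remove_non_text
  have := PySem.List.foldl_append_singleton_eq_map
    (fun tok : String => String.mk (tok.toList.filter (fun c => c ∈ pyCharacters))) tokens []
  simpa [inner_fold_eq, stripA] using this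

-- the per-entry results of A and B agree
theorem entry_eq (entry : String) :
    remove_non_text (remove_empty_tokens (pySplitSpace entry)) = scanEntry entry.toList := by
  rw [remove_empty_tokens_eq, remove_non_text_eq]
  have h1 : scanEntry entry.toList
      = (flushSt (entry.toList.foldl scanStep ([], [], false))).map String.mk := rfl
  rw [h1, scan_process entry.toList [] [] false]
  rw [← split_process entry.toList]
  have htl : ∀ x : List Char, (String.mk x).toList = x := by intro x; exact String.toList_ofList
  have hemp : ∀ x : List Char, (String.mk x = "") = (x = []) := by
    intro x
    apply propext
    constructor
    · intro h2; have h3 := congrArg String.toList h2; simpa [htl] using h3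
    · intro h2; subst h2; rfl
  simp [pySplitSpace, List.filter_map, Function.comp_def, htl, hemp]

-- ===== VERDICT =====
theorem delimit_spec : Claim_equal_delimit := by
  intro data _
  unfold Spec_delimit delimit delimit_alt
  have := PySem.List.foldl_append_singleton_eq_map
    (fun entry : String => remove_non_text (remove_empty_tokens (pySplitSpace entry))) data []
  simpa [entry_eq] using this
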